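-- pv_equiv track=rewrite | github.com/Sanjay8602/-30-days-challenges-AG | Amazon/phone directory.py | displayContacts
-- ===== SOURCE A (Python) =====
-- def displayContacts(n, contact, s):
--     # code here
--     contact = sorted(set(contact))
--     result = []
--
--     for i in range(1, len(s) + 1):
--         prefix = s[:i]
--         matches = [entry for entry in contact if entry.startswith(prefix)]
--         result.append(matches if matches else ["0"])
--
--     return result
-- ===== SOURCE B (Python) =====
-- def displayContacts(n, contact, s):
--     # Incremental narrowing: keep only the candidates that survived the previous
--     # (one character shorter) prefix and test a single character per step,
--     # instead of rescanning the whole directory with a full startswith per prefix.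
--     cands = sorted(set(contact))
--     result = []
--     for i, ch in enumerate(s):
--         cands = [e for e in cands if len(e) > i and e[i] == ch]
--         result.append(cands if cands else ["0"])
--     return result
-- ===== Notes on version B (the rewrite author's own statement) =====
-- stated objective: faster
-- what changed: Instead of rescanning the whole sorted directory with a full startswith test for every prefix length, B keeps one shrinking candidate list and narrows it per prefix step by comparing a single character at the step's index.
import Mathlib
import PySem

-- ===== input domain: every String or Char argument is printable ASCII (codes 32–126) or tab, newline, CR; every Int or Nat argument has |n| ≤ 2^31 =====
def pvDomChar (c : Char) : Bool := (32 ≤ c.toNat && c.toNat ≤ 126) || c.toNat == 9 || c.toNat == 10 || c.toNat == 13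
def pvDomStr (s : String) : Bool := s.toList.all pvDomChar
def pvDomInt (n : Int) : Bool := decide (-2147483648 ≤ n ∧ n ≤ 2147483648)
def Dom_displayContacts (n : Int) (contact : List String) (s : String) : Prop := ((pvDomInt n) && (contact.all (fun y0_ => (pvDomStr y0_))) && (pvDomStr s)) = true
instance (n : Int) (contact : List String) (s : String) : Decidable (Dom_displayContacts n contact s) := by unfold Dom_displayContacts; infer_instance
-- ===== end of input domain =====

-- B narrows one maintained candidate list by a single-character test per prefix step instead of
-- rescanning the whole directory with a full startswith test for every prefix (alternative/faster mechanism).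

-- ===== PORT A =====
def displayContacts (n : Int) (contact : List String) (s : String) : List (List String) :=
  let contact := PySem.List.sorted (PySem.Set.ofList contact) (fun x => x) false
  (PySem.List.pyRange 1 (PySem.Str.len s + 1) 1).foldl
    (fun result i =>
      let pre := PySem.Str.slice s none (some i)
      let matchesL := contact.filter (fun entry => PySem.Str.startswith entry pre)
      result ++ [if matchesL = [] then ["0"] else matchesL]) []

-- ===== PORT B =====
-- the body of B's 'for i, ch in enumerate(s)' loop, recursing over the remaining characters
def altGo (i : Nat) (chs : List Char) (cands : List String) : List (List String) :=
  match chs with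
  | [] => []
  | ch :: rest =>
      let cands' := cands.filter (fun e =>
        decide (i < e.toList.length) && (PySem.List.pyGet? e.toList (i : Int) == some ch))
      (if cands' = [] then ["0"] else cands') :: altGo (i + 1) rest cands'

def displayContacts_alt (n : Int) (contact : List String) (s : String) : List (List String) :=
  altGo 0 s.toList (PySem.List.sorted (PySem.Set.ofList contact) (fun x => x) false)

-- ===== PRECONDITION & SPEC =====
def Spec_displayContacts (n : Int) (contact : List String) (s : String) (out : List (List String)) : Prop := out = displayContacts_alt n contact s
instance (n : Int) (contact : List String) (s : String) (out : List (List String)) : Decidable (Spec_displayContacts n contact s out) := by unfold Spec_displayContacts; infer_instance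

-- ===== CLAIM (what is proved, stated in full; the proofs are below) =====
def Claim_equal_displayContacts : Prop := ∀ (n : Int) (contact : List String) (s : String), Dom_displayContacts n contact s → Spec_displayContacts n contact s (displayContacts n contact s)

-- ===== LEMMAS AND PROOFS =====

-- the j-th output row, relative to the deduplicated sorted directory `base` and the query chars `t`
def outAt (base : List String) (t : List Char) (j : Nat) : List String :=
  let m := base.filter (fun e => decide (t.take j <+: e.toList))
  if m = [] then ["0"] else m

theorem prefix_snoc_iff (p : List Char) (c : Char) (l : List Char) :
    (p ++ [c]) <+: l ↔ p <+: l ∧ l[p.length]? = some c := by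
  constructor
  · rintro ⟨r, rfl⟩
    refine ⟨⟨[c] ++ r, by simp⟩, ?_⟩
    simp
  · rintro ⟨⟨r, rfl⟩, h⟩
    rw [List.getElem?_append_right (le_refl _)] at h
    simp only [Nat.sub_self] at h
    cases r with
    | nil => simp at h
    | cons x r' =>
      simp only [List.getElem?_cons_zero, Option.some.injEq] at h
      exact ⟨r', by simp [h]⟩

theorem altGo_spec (base : List String) (t : List Char) :
    ∀ (u : List Char) (i : Nat), t.drop i = u →
      altGo i u (base.filter (fun e => decide (t.take i <+: e.toList)))
        = (List.range (t.length - i)).map (fun k => outAt base t (i + k + 1)) := by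
  intro u
  induction u with
  | nil =>
    intro i h
    have hlen : t.length ≤ i := by
      have := congrArg List.length h
      simp at this
      omega
    simp [altGo, Nat.sub_eq_zero_of_le hlen]
  | cons ch rest ih =>
    intro i h
    have hi : i < t.length := by
      have := congrArg List.length h
      simp at this
      omega
    have hti : t[i]? = some ch := by
      have : (t.drop i)[0]? = some ch := by rw [h]; rfl
      rwa [List.getElem?_drop, Nat.add_zero] at this
    have hdrop : t.drop (i + 1) = rest := by
      have : (t.drop i).drop 1 = rest := by rw [h]; rfl
      rw [List.drop_drop] at this
      exact this
    have hfilter :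
        (base.filter (fun e => decide (t.take i <+: e.toList))).filter
            (fun e => decide (i < e.toList.length) && (PySem.List.pyGet? e.toList (i : Int) == some ch))
          = base.filter (fun e => decide (t.take (i + 1) <+: e.toList)) := by
      rw [List.filter_filter]
      apply List.filter_congr
      intro e _
      rw [Bool.eq_iff_iff]
      rw [PySem.List.pyGet?_natCast]
      have htake : t.take (i + 1) = t.take i ++ [ch] := by
        rw [List.take_add_one, hti]; rfl
      have hplen : (t.take i).length = i := by
        simp [Nat.min_eq_left (Nat.le_of_lt hi)]
      constructor
      · intro hx
        simp only [Bool.and_eq_true, decide_eq_true_eq, beq_iff_eq] at hx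
        rw [htake, decide_eq_true_eq, prefix_snoc_iff, hplen]
        exact ⟨hx.2, hx.1.2⟩
      · intro hx
        rw [htake, decide_eq_true_eq, prefix_snoc_iff, hplen] at hx
        have hlt : i < e.toList.length := by
          by_contra hge
          rw [List.getElem?_eq_none (by omega)] at hx
          exact absurd hx.2 (by simp)
        simp only [Bool.and_eq_true, decide_eq_true_eq, beq_iff_eq]
        exact ⟨⟨hlt, hx.2⟩, hx.1⟩
    have hsub : t.length - i = (t.length - (i + 1)) + 1 := by omega
    rw [altGo]
    simp only [hfilter]
    rw [ih (i + 1) hdrop, hsub, List.range_succ_eq_map, List.map_cons, List.map_map]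
    congr 1
    apply List.map_congr_left
    intro k _
    show outAt base t (i + 1 + k + 1) = outAt base t (i + Nat.succ k + 1)
    congr 1
    omega

theorem flatMap_singleton_map {α β : Type} (f : α → β) (l : List α) :
    l.flatMap (fun x => [f x]) = l.map f := by
  induction l with
  | nil => rfl
  | cons x xs ih => simp [List.flatMap_cons, ih]

theorem displayContacts_eq_map (n : Int) (contact : List String) (s : String) :
    displayContacts n contact s
      = (List.range s.toList.length).map
          (fun k => outAt (PySem.List.sorted (PySem.Set.ofList contact) (fun x => x) false) s.toList (k + 1)) := by
  unfold displayContacts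
  rw [PySem.List.foldl_append_eq_flatMap, List.nil_append, flatMap_singleton_map]
  have hlen : PySem.Str.len s = (s.toList.length : Int) := by
    simp [PySem.Str.len_eq]
  rw [hlen]
  have hrange : PySem.List.pyRange 1 ((s.toList.length : Int) + 1) 1
      = (List.range s.toList.length).map (fun (k : Nat) => (1 : Int) + (k : Int)) := by
    rw [PySem.List.pyRange_one]
    have h1 : ((s.toList.length : Int) + 1 - 1).toNat = s.toList.length := by omega
    rw [h1]
  rw [hrange, List.map_map]
  apply List.map_congr_left
  intro k _
  simp only [Function.comp]
  show (if _ = _ then _ else _) = outAt _ s.toList (k + 1)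
  have hpre : ∀ e : String,
      PySem.Str.startswith e (PySem.Str.slice s none (some ((1 : Int) + k)))
        = decide (s.toList.take (k + 1) <+: e.toList) := by
    intro e
    rw [Bool.eq_iff_iff, PySem.Str.startswith_eq, PySem.Chars.startswith_iff,
      PySem.Str.toList_slice, PySem.Chars.slice_eq_listSlice,
      PySem.List.slice_to s.toList (by omega : (0 : Int) ≤ 1 + (k : Int))]
    have : ((1 : Int) + k).toNat = k + 1 := by omega
    rw [this, decide_eq_true_eq]
  simp only [hpre]
  simp [outAt]

-- ===== VERDICT (by name: the statement is the Claim_ definition above) =====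
theorem displayContacts_spec : Claim_equal_displayContacts := by
  intro n contact s _
  show displayContacts n contact s = displayContacts_alt n contact s
  rw [displayContacts_eq_map]
  unfold displayContacts_alt
  have hbase : PySem.List.sorted (PySem.Set.ofList contact) (fun x => x) false
      = (PySem.List.sorted (PySem.Set.ofList contact) (fun x => x) false).filter
          (fun e => decide (s.toList.take 0 <+: e.toList)) := by
    simp
  rw [hbase, altGo_spec _ s.toList s.toList 0 (by simp)]
  simp only [Nat.sub_zero]
  apply List.map_congr_left
  intro k _
  norm_num
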